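-- pv_equiv track=rewrite | github.com/skhan877/aoc2015 | day1.py | part_two
-- ===== SOURCE A (Python) =====
-- def part_two(input):
--
--     instructions = input[0]
--     n = len(instructions)
--     level = 0
--
--     for i in range(n):
--         if instructions[i] == "(":
--             level += 1
--         elif instructions[i] == ")":
--             level -=1
--
--         if level == -1:
--             return i  + 1
--
--     return -1
-- ===== SOURCE B (Python) =====
-- def part_two(input):
--     instructions = input[0]
--
--     def delta(c):
--         return 1 if c == "(" else -1 if c == ")" else 0
--
--     def summary(s):
--         # (total level change, minimum running level) of a segment, by halving
--         if len(s) <= 1: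
--             d = delta(s[0]) if s else 0
--             return (d, min(0, d))
--         m = len(s) // 2
--         t1, m1 = summary(s[:m])
--         t2, m2 = summary(s[m:])
--         return (t1 + t2, min(m1, t1 + m2))
--
--     def search(s, level):
--         # first 1-based position where the level reaches -1; requires level + minlevel(s) <= -1
--         if len(s) <= 1:
--             return 1
--         m = len(s) // 2
--         t1, m1 = summary(s[:m])
--         if level + m1 <= -1:
--             return search(s[:m], level)
--         return m + search(s[m:], level + t1)
--
--     t, mp = summary(instructions)
--     return search(instructions, 0) if mp <= -1 else -1
-- ===== Notes on version B (the rewrite author's own statement) =====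
-- stated objective: alternative
-- what changed: B replaces A's linear scan with early exit by a divide-and-conquer algorithm: each half-segment is summarized as (total level change, minimum running level), and a binary descent into the half whose summary first reaches -1 locates the answer; the existence check is a single root summary.
import Mathlib
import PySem

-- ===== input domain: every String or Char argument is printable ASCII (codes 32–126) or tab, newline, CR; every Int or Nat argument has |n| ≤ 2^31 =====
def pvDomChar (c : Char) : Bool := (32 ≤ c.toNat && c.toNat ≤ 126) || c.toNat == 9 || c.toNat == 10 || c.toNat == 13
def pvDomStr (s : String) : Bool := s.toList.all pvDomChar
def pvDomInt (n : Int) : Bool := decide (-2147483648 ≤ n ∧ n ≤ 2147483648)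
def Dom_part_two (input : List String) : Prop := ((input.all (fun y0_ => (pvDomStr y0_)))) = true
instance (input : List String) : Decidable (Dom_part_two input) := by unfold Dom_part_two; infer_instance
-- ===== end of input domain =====

-- B replaces A's linear scan by divide-and-conquer segment summaries (total, min level) with a binary descent; same result, different algorithm.

-- ===== PORT A =====
-- A's for-loop over indices: structural recursion over the characters carrying the index i and level.
def partTwoLoopA : List Char → Int → Int → Int
  | [], _, _ => -1
  | c :: rest, i, level =>
    let level' := if c = '(' then level + 1 else if c = ')' then level - 1 else level
    if level' = -1 then i + 1 else partTwoLoopA rest (i + 1) level'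

def part_two (input : List String) : Int :=
  let instructions := (input.headD "").toList   -- input[0]; Pre_ excludes [], where Python raises IndexError
  partTwoLoopA instructions 0 0

-- ===== PORT B =====
def deltaB (c : Char) : Int := if c = '(' then 1 else if c = ')' then -1 else 0

-- (total level change, minimum running level) of a segment, by halving
def summaryB (s : List Char) : Int × Int :=
  if s.length ≤ 1 then
    let d := match s with | [] => 0 | c :: _ => deltaB c
    (d, min 0 d)
  else
    let m := s.length / 2
    let p1 := summaryB (s.take m)
    let p2 := summaryB (s.drop m)
    (p1.1 + p2.1, min p1.2 (p1.1 + p2.2))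
termination_by s.length
decreasing_by
  · simp [List.length_take]; omega
  · simp [List.length_drop]; omega

-- first 1-based position where the level reaches -1; requires level + minlevel(s) ≤ -1
def searchB (s : List Char) (level : Int) : Int :=
  if s.length ≤ 1 then 1
  else
    let m := s.length / 2
    let p1 := summaryB (s.take m)
    if level + p1.2 ≤ -1 then searchB (s.take m) level
    else (m : Int) + searchB (s.drop m) (level + p1.1)
termination_by s.length
decreasing_by
  · simp [List.length_take]; omega
  · simp [List.length_drop]; omega

def part_two_alt (input : List String) : Int :=
  let instructions := (input.headD "").toList   -- input[0]; raises on [] too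
  let p := summaryB instructions
  if p.2 ≤ -1 then searchB instructions 0 else -1

-- ===== PRECONDITION & SPEC =====
-- Pre_ excludes the empty list, on which input[0] raises IndexError in both A and B.
def Pre_part_two (input : List String) : Prop := input ≠ []
instance (input : List String) : Decidable (Pre_part_two input) := by unfold Pre_part_two; infer_instance
def pvWitness_part_two : List String := ["(())"]

def Spec_part_two (input : List String) (out : Int) : Prop := out = part_two_alt input
instance (input : List String) (out : Int) : Decidable (Spec_part_two input out) := by unfold Spec_part_two; infer_instance

-- ===== CLAIM (what is proved, stated in full; the proofs are below) =====
def Claim_equal_part_two : Prop := ∀ (input : List String), Dom_part_two input → Pre_part_two input → Spec_part_two input (part_two input)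

-- ===== LEMMAS AND PROOFS =====

-- reference quantities: total level change and minimum running level of a segment
def totB : List Char → Int
  | [] => 0
  | c :: r => deltaB c + totB r

def mpB : List Char → Int
  | [] => 0
  | c :: r => min 0 (deltaB c + mpB r)

-- reference first-hit position (1-based), meaningful when level + mpB s ≤ -1
def hitB : List Char → Int → Int
  | [], _ => 1
  | c :: r, lvl => if lvl + deltaB c ≤ -1 then 1 else 1 + hitB r (lvl + deltaB c)

lemma deltaB_bounds (c : Char) : -1 ≤ deltaB c ∧ deltaB c ≤ 1 := by
  unfold deltaB; split_ifs <;> omega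

lemma mpB_nonpos (s : List Char) : mpB s ≤ 0 := by
  cases s with
  | nil => simp [mpB]
  | cons c r => simp [mpB]

lemma mpB_le_totB (s : List Char) : mpB s ≤ totB s := by
  induction s with
  | nil => simp [mpB, totB]
  | cons c r ih => simp [mpB, totB]; right; omega

lemma totB_append (a b : List Char) : totB (a ++ b) = totB a + totB b := by
  induction a with
  | nil => simp [totB]
  | cons c r ih => simp [totB, ih]; ring

lemma mpB_append (a b : List Char) : mpB (a ++ b) = min (mpB a) (totB a + mpB b) := by
  induction a with
  | nil => have := mpB_nonpos b; simp [mpB, totB]; omega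
  | cons c r ih => simp [mpB, totB, ih]; omega

-- B's halving summary computes exactly (totB, mpB), by strong induction on the length
lemma summaryB_eq_aux : ∀ (n : Nat), ∀ (s : List Char), s.length ≤ n → summaryB s = (totB s, mpB s) := by
  intro n
  induction n with
  | zero =>
    intro s hs
    match s, hs with
    | [], _ => simp [summaryB, totB, mpB]
  | succ n ih =>
    intro s hs
    by_cases h : s.length ≤ 1
    · match s, h with
      | [], _ => simp [summaryB, totB, mpB]
      | [c], _ => simp [summaryB, totB, mpB]
    · unfold summaryB
      rw [if_neg h]
      have ih1 := ih (s.take (s.length / 2)) (by simp [List.length_take]; omega)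
      have ih2 := ih (s.drop (s.length / 2)) (by simp [List.length_drop]; omega)
      have ht := totB_append (s.take (s.length / 2)) (s.drop (s.length / 2))
      have hmp := mpB_append (s.take (s.length / 2)) (s.drop (s.length / 2))
      rw [List.take_append_drop] at ht hmp
      simp only [ih1, ih2, Prod.mk.injEq]
      exact ⟨by omega, by omega⟩

lemma summaryB_eq (s : List Char) : summaryB s = (totB s, mpB s) :=
  summaryB_eq_aux s.length s le_rfl

-- hitB splits at an append point
lemma hitB_append_left (a b : List Char) : ∀ lvl : Int, 0 ≤ lvl → lvl + mpB a ≤ -1 →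
    hitB (a ++ b) lvl = hitB a lvl := by
  induction a with
  | nil => intro lvl h0 h1; simp [mpB] at h1; omega
  | cons c r ih =>
    intro lvl h0 h1
    simp only [List.cons_append, hitB]
    by_cases hc : lvl + deltaB c ≤ -1
    · simp [hc]
    · rw [if_neg hc, if_neg hc, ih (lvl + deltaB c) (by omega)]
      simp [mpB] at h1; omega

lemma hitB_append_right (a b : List Char) : ∀ lvl : Int, 0 ≤ lvl → ¬ (lvl + mpB a ≤ -1) →
    hitB (a ++ b) lvl = (a.length : Int) + hitB b (lvl + totB a) := by
  induction a with
  | nil => intro lvl _ _; simp [totB]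
  | cons c r ih =>
    intro lvl h0 h1
    simp only [mpB] at h1
    have hr := mpB_nonpos r
    have hc : ¬ (lvl + deltaB c ≤ -1) := by omega
    simp only [List.cons_append, hitB, if_neg hc, totB]
    rw [ih (lvl + deltaB c) (by omega) (by omega)]
    simp only [List.length_cons]
    push_cast
    ring

-- B's binary descent computes the reference first-hit position
lemma searchB_eq_hitB_aux : ∀ (n : Nat), ∀ (s : List Char) (lvl : Int), s.length ≤ n →
    0 ≤ lvl → lvl + mpB s ≤ -1 → searchB s lvl = hitB s lvl := by
  intro n
  induction n with
  | zero =>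
    intro s lvl hs h0 h1
    match s, hs with
    | [], _ => simp [mpB] at h1; omega
  | succ n ih =>
    intro s lvl hs h0 h1
    by_cases h : s.length ≤ 1
    · unfold searchB
      rw [if_pos h]
      match s, h with
      | [], _ => simp [mpB] at h1; omega
      | [c], _ =>
        simp [mpB] at h1
        simp [hitB, show lvl + deltaB c ≤ -1 by omega]
    · unfold searchB
      rw [if_neg h]
      simp only [summaryB_eq]
      have hmp := mpB_append (s.take (s.length / 2)) (s.drop (s.length / 2))
      rw [List.take_append_drop] at hmp
      have hle := mpB_le_totB (s.take (s.length / 2))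
      by_cases hc : lvl + mpB (s.take (s.length / 2)) ≤ -1
      · rw [if_pos hc, ih (s.take (s.length / 2)) lvl (by simp [List.length_take]; omega) h0 hc]
        have := hitB_append_left (s.take (s.length / 2)) (s.drop (s.length / 2)) lvl h0 hc
        rw [List.take_append_drop] at this
        exact this.symm
      · rw [if_neg hc,
          ih (s.drop (s.length / 2)) (lvl + totB (s.take (s.length / 2)))
            (by simp [List.length_drop]; omega) (by omega) (by omega)]
        have hr := hitB_append_right (s.take (s.length / 2)) (s.drop (s.length / 2)) lvl h0 hc
        rw [List.take_append_drop] at hr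
        have hlen : (s.take (s.length / 2)).length = s.length / 2 := by
          simp [List.length_take]; omega
        rw [hr, hlen]

lemma searchB_eq_hitB (s : List Char) (lvl : Int) (h0 : 0 ≤ lvl) (h1 : lvl + mpB s ≤ -1) :
    searchB s lvl = hitB s lvl :=
  searchB_eq_hitB_aux s.length s lvl le_rfl h0 h1

-- A's loop computes the same reference quantities
lemma partTwoLoopA_eq (cs : List Char) : ∀ (i lvl : Int), 0 ≤ lvl →
    partTwoLoopA cs i lvl = if lvl + mpB cs ≤ -1 then i + hitB cs lvl else -1 := by
  induction cs with
  | nil => intro i lvl h0; simp [partTwoLoopA, mpB]; omega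
  | cons c rest ih =>
    intro i lvl h0
    have hd : (if c = '(' then lvl + 1 else if c = ')' then lvl - 1 else lvl) = lvl + deltaB c := by
      simp only [deltaB]; split_ifs <;> ring
    have hb := deltaB_bounds c
    have hrmp := mpB_nonpos rest
    simp only [partTwoLoopA, hd]
    by_cases hneg : lvl + deltaB c = -1
    · rw [if_pos hneg]
      have : lvl + mpB (c :: rest) ≤ -1 := by simp [mpB]; omega
      rw [if_pos this]
      simp [hitB, show lvl + deltaB c ≤ -1 by omega]
    · rw [if_neg hneg]
      have h0' : 0 ≤ lvl + deltaB c := by omega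
      rw [ih (i + 1) (lvl + deltaB c) h0']
      have hmpc : (lvl + mpB (c :: rest) ≤ -1) ↔ ((lvl + deltaB c) + mpB rest ≤ -1) := by
        simp [mpB]; omega
      by_cases hcond : (lvl + deltaB c) + mpB rest ≤ -1
      · rw [if_pos hcond, if_pos (hmpc.mpr hcond)]
        simp [hitB, show ¬ (lvl + deltaB c ≤ -1) by omega]
        ring
      · rw [if_neg hcond, if_neg (fun h => hcond (hmpc.mp h))]

-- ===== VERDICT (by name: the statement is the Claim_ definition above) =====
theorem part_two_spec : Claim_equal_part_two := by
  intro input _ _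
  unfold Spec_part_two
  simp only [part_two, part_two_alt, summaryB_eq]
  rw [partTwoLoopA_eq _ 0 0 le_rfl]
  by_cases h : (0 : Int) + mpB (input.headD "").toList ≤ -1
  · rw [if_pos h, if_pos (by simpa using h)]
    rw [searchB_eq_hitB _ 0 le_rfl h]
    ring
  · rw [if_neg h, if_neg (by simpa using h)]
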